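-- pv_equiv track=rewrite | github.com/wbopan/flashtrace | exp/exp4/run_exp.py | _last_meaningful_code_line_char_span
-- ===== SOURCE A (Python) =====
-- from typing import Any, Dict, List, Optional, Sequence, Tuple
--
-- def _last_meaningful_code_line_char_span(target: str) -> Optional[Tuple[int, int]]:
--     lines = target.splitlines(keepends=True)
--     pos = 0
--     spans: List[Tuple[int, int, str]] = []
--     for line in lines:
--         start = pos
--         pos += len(line)
--         spans.append((start, pos, line))
--
--     for start, end, line in reversed(spans):
--         stripped = line.strip()
--         if not stripped:
--             continue
--         if stripped.startswith("```"):
--             continue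
--         if start == 0 and stripped.endswith(".py"):
--             return None
--
--         line_no_nl = line.rstrip("\r\n")
--         end_no_nl = start + len(line_no_nl)
--         if end_no_nl <= start:
--             continue
--         return start, end_no_nl
--
--     return None
-- ===== SOURCE B (Python) =====
-- # One forward pass keeping a single running 'best' candidate instead of
-- # building a spans list and scanning it in reverse.
-- def _last_meaningful_code_line_char_span(target):
--     pos = 0
--     best = None
--     for line in target.splitlines(keepends=True):
--         start = pos
--         pos += len(line)
--         stripped = line.strip()
--         if stripped and not stripped.startswith("```"):
--             best = (start, start + len(line.rstrip("\r\n")), stripped)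
--     if best is None:
--         return None
--     start, end, stripped = best
--     if start == 0 and stripped.endswith(".py"):
--         return None
--     return (start, end)
-- ===== Notes on version B (the rewrite author's own statement) =====
-- stated objective: simpler
-- what changed: Replaces A's two-phase spans-list build plus reverse scan with a single forward pass that keeps one running 'best' (last meaningful line) accumulator and applies the start==0/'.py' rule once at the end.
import Mathlib
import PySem

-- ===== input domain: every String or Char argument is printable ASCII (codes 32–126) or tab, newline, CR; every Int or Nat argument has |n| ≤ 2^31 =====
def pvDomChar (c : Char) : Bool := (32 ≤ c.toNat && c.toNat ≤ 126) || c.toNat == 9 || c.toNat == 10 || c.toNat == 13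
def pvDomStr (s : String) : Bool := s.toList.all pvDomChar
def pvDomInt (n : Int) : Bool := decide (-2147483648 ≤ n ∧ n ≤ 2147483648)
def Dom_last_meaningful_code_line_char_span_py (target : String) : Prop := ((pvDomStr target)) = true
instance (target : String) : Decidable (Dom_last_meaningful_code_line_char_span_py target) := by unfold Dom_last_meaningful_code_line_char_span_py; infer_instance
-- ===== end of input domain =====

-- B replaces A's spans-list build + reverse scan by one forward pass with a single running
-- 'best' (last meaningful line) accumulator; same values, simpler structure.


-- shared primitive: Python str.splitlines(keepends=True), exact for the line breaks
-- '\n', '\r', '\r\n' (the only ones in Dom); ported by hand (PySem.Chars.splitlines drops ends)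
def pvSplitKeep (acc : List Char) : List Char → List (List Char)
  | [] => if acc.isEmpty then [] else [acc.reverse]
  | '\r' :: '\n' :: rest => (acc.reverse ++ ['\r', '\n']) :: pvSplitKeep [] rest
  | '\r' :: rest => (acc.reverse ++ ['\r']) :: pvSplitKeep [] rest
  | '\n' :: rest => (acc.reverse ++ ['\n']) :: pvSplitKeep [] rest
  | c :: rest => pvSplitKeep (c :: acc) rest

-- shared primitive: Python line.rstrip("\r\n"); ported by hand (PySem has no one-sided strip-with-chars)
def pvRstripCRLF (l : List Char) : List Char :=
  (l.reverse.dropWhile (fun c => c == '\r' || c == '\n')).reverse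

def pvTicks : List Char := ['`', '`', '`']
def pvPyExt : List Char := ['.', 'p', 'y']

-- ===== PORT A =====
-- the second loop: 'for start, end, line in reversed(spans)' (applied to spans.reverse)
def pvScanRev : List (Int × Int × List Char) → Option (Int × Int)
  | [] => none
  | (start, _end, line) :: rest =>
    let stripped := PySem.Chars.strip line
    if stripped.isEmpty then pvScanRev rest
    else if PySem.Chars.startswith stripped pvTicks then pvScanRev rest
    else if start == 0 && PySem.Chars.endswith stripped pvPyExt then none
    else
      let lineNoNl := pvRstripCRLF line
      let endNoNl : Int := start + lineNoNl.length
      if endNoNl ≤ start then pvScanRev rest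
      else some (start, endNoNl)

def last_meaningful_code_line_char_span_py (target : String) : Option (Int × Int) :=
  let lines := pvSplitKeep [] target.toList
  let st := lines.foldl
    (fun (st : Int × List (Int × Int × List Char)) line =>
      (st.1 + line.length, st.2 ++ [(st.1, st.1 + (line.length : Int), line)]))
    (0, [])
  pvScanRev st.2.reverse

-- ===== PORT B =====
def last_meaningful_code_line_char_span_py_alt (target : String) : Option (Int × Int) :=
  let st := (pvSplitKeep [] target.toList).foldl
    (fun (st : Int × Option (Int × Int × List Char)) line =>
      let stripped := PySem.Chars.strip line
      if !stripped.isEmpty && !PySem.Chars.startswith stripped pvTicks then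
        (st.1 + line.length, some (st.1, st.1 + ((pvRstripCRLF line).length : Int), stripped))
      else (st.1 + line.length, st.2))
    (0, none)
  match st.2 with
  | none => none
  | some (s, e, stripped) =>
    if s == 0 && PySem.Chars.endswith stripped pvPyExt then none else some (s, e)

-- ===== PRECONDITION & SPEC =====
def Spec_last_meaningful_code_line_char_span_py (target : String) (out : Option (Int × Int)) : Prop := out = last_meaningful_code_line_char_span_py_alt target
instance (target : String) (out : Option (Int × Int)) : Decidable (Spec_last_meaningful_code_line_char_span_py target out) := by unfold Spec_last_meaningful_code_line_char_span_py; infer_instance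

-- ===== CLAIM (what is proved, stated in full; the proofs are below) =====
def Claim_equal_last_meaningful_code_line_char_span_py : Prop := ∀ (target : String), Dom_last_meaningful_code_line_char_span_py target → Spec_last_meaningful_code_line_char_span_py target (last_meaningful_code_line_char_span_py target)

-- ===== LEMMAS AND PROOFS =====

-- 'line is meaningful' (non-blank, not a code fence)
def pvM (l : List Char) : Bool :=
  !(PySem.Chars.strip l).isEmpty && !PySem.Chars.startswith (PySem.Chars.strip l) pvTicks

-- last meaningful line with its start offset
def pvLM (pos : Int) : List (List Char) → Option (Int × List Char)
  | [] => none
  | l :: ls => (pvLM (pos + l.length) ls).or (if pvM l then some (pos, l) else none)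

def pvSpansOf (pos : Int) : List (List Char) → List (Int × Int × List Char)
  | [] => []
  | l :: ls => (pos, pos + (l.length : Int), l) :: pvSpansOf (pos + l.length) ls

lemma pvFoldA (ls : List (List Char)) : ∀ (pos : Int) (sp : List (Int × Int × List Char)),
    (ls.foldl (fun (st : Int × List (Int × Int × List Char)) line =>
      (st.1 + line.length, st.2 ++ [(st.1, st.1 + (line.length : Int), line)])) (pos, sp)).2
    = sp ++ pvSpansOf pos ls := by
  induction ls with
  | nil => intro pos sp; simp [pvSpansOf]
  | cons l ls ih =>
    intro pos sp
    simp only [List.foldl_cons, pvSpansOf]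
    rw [ih]
    simp

lemma pvRstrip_ne_nil {l : List Char} (h : pvM l = true) : pvRstripCRLF l ≠ [] := by
  intro hnil
  have hall : ∀ c ∈ l, PySem.Chars.isspace c = true := by
    intro c hc
    have : l.reverse.dropWhile (fun c => c == '\r' || c == '\n') = [] := by
      simpa [pvRstripCRLF] using congrArg List.reverse hnil
    have hcrlf : (c == '\r' || c == '\n') = true :=
      List.dropWhile_eq_nil_iff.mp this c (List.mem_reverse.mpr hc)
    rcases Bool.or_eq_true_iff.mp hcrlf with h' | h'
    · have hc' : c = '\r' := by simpa using h'
      subst hc'; decide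
    · have hc' : c = '\n' := by simpa using h'
      subst hc'; decide
  have hstrip : PySem.Chars.strip l = [] := by
    have hls : PySem.Chars.lstrip l = [] := by
      simp [PySem.Chars.lstrip, List.dropWhile_eq_nil_iff]
      intro c hc; exact hall c hc
    simp [PySem.Chars.strip, hls, PySem.Chars.rstrip]
  simp [pvM, hstrip] at h

lemma pvScanRev_eq (es : List (Int × Int × List Char)) :
    pvScanRev es = match es.find? (fun e => pvM e.2.2) with
      | none => none
      | some (s, _, l) =>
        if s == 0 && PySem.Chars.endswith (PySem.Chars.strip l) pvPyExt then none
        else some (s, s + ((pvRstripCRLF l).length : Int)) := by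
  induction es with
  | nil => simp [pvScanRev, List.find?]
  | cons e rest ih =>
    obtain ⟨s, en, l⟩ := e
    by_cases hM : pvM l = true
    · have h1 : (PySem.Chars.strip l).isEmpty = false := by
        rcases Bool.and_eq_true_iff.mp hM with ⟨h1, _⟩; simpa using h1
      have h2 : PySem.Chars.startswith (PySem.Chars.strip l) pvTicks = false := by
        rcases Bool.and_eq_true_iff.mp hM with ⟨_, h2⟩; simpa using h2
      have hfind : List.find? (fun e => pvM e.2.2) ((s, en, l) :: rest) = some (s, en, l) := by
        simp [List.find?, hM]
      rw [hfind]
      simp only [pvScanRev, h1, h2, Bool.false_eq_true, if_false]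
      by_cases hpy : (s == 0 && PySem.Chars.endswith (PySem.Chars.strip l) pvPyExt) = true
      · simp [hpy]
      · have hlen : 0 < (pvRstripCRLF l).length :=
          List.length_pos_iff.mpr (pvRstrip_ne_nil hM)
        have hle : ¬ (s + ((pvRstripCRLF l).length : Int) ≤ s) := by omega
        simp [hpy, hle]
    · have hfind : List.find? (fun e => pvM e.2.2) ((s, en, l) :: rest)
          = List.find? (fun e => pvM e.2.2) rest := by
        simp [List.find?, Bool.eq_false_iff.mpr hM]
      rw [hfind, ← ih]
      by_cases h1 : (PySem.Chars.strip l).isEmpty = true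
      · simp [pvScanRev, h1]
      · have h2 : PySem.Chars.startswith (PySem.Chars.strip l) pvTicks = true := by
          simp [pvM] at hM
          simpa using hM (by simpa using h1)
        simp [pvScanRev, h1, h2]

lemma pvFind_reverse_spans (ls : List (List Char)) : ∀ (pos : Int),
    ((pvSpansOf pos ls).reverse).find? (fun e => pvM e.2.2)
    = (pvLM pos ls).map (fun p => (p.1, p.1 + (p.2.length : Int), p.2)) := by
  induction ls with
  | nil => intro pos; simp [pvSpansOf, pvLM]
  | cons l ls ih =>
    intro pos
    simp only [pvSpansOf, pvLM, List.reverse_cons, List.find?_append, ih]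
    cases h : pvLM (pos + l.length) ls with
    | none =>
      simp only [Option.map_none, Option.none_or]
      by_cases hM : pvM l = true
      · simp [List.find?, hM]
      · simp [List.find?, Bool.eq_false_iff.mpr hM]
    | some p => simp

lemma pvFoldB (ls : List (List Char)) : ∀ (pos : Int) (acc : Option (Int × Int × List Char)),
    (ls.foldl (fun (st : Int × Option (Int × Int × List Char)) line =>
      let stripped := PySem.Chars.strip line
      if !stripped.isEmpty && !PySem.Chars.startswith stripped pvTicks then
        (st.1 + line.length, some (st.1, st.1 + ((pvRstripCRLF line).length : Int), stripped))
      else (st.1 + line.length, st.2)) (pos, acc)).2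
    = ((pvLM pos ls).map
        (fun p => (p.1, p.1 + ((pvRstripCRLF p.2).length : Int), PySem.Chars.strip p.2))).or acc := by
  induction ls with
  | nil => intro pos acc; simp [pvLM]
  | cons l ls ih =>
    intro pos acc
    simp only [List.foldl_cons, pvLM]
    by_cases hM : pvM l = true
    · have hM' : (!(PySem.Chars.strip l).isEmpty
          && !PySem.Chars.startswith (PySem.Chars.strip l) pvTicks) = true := hM
      simp only [hM', if_true, ih]
      cases h : pvLM (pos + l.length) ls with
      | none => simp [hM]
      | some p => simp
    · have hM' : (!(PySem.Chars.strip l).isEmpty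
          && !PySem.Chars.startswith (PySem.Chars.strip l) pvTicks) = false :=
        Bool.eq_false_iff.mpr hM
      simp only [hM', Bool.false_eq_true, if_false, ih]
      cases h : pvLM (pos + l.length) ls with
      | none => simp [hM]
      | some p => simp

-- ===== VERDICT (by name: the statement is the Claim_ definition above) =====
theorem last_meaningful_code_line_char_span_py_spec : Claim_equal_last_meaningful_code_line_char_span_py := by
  intro target _
  unfold Spec_last_meaningful_code_line_char_span_py
  unfold last_meaningful_code_line_char_span_py last_meaningful_code_line_char_span_py_alt
  simp only [pvFoldA, List.nil_append, pvScanRev_eq, pvFind_reverse_spans, pvFoldB, Option.or_none]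
  cases h : pvLM 0 (pvSplitKeep [] target.toList) with
  | none => simp
  | some p => simp
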